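-- pv_equiv track=rewrite | github.com/grzegorznowak/CURe | ui.py | _clean_tail_lines
-- ===== SOURCE A (Python) =====
-- def _clean_tail_lines(raw_lines: list[str]) -> list[str]:
--     cleaned: list[str] = []
--     last_blank = False
--     for raw in raw_lines:
--         s = str(raw).rstrip("\r\n")
--         t = s.strip()
--         if t and len(t) >= 3 and set(t) == {"#"}:
--             continue
--         if not t:
--             if last_blank:
--                 continue
--             last_blank = True
--             cleaned.append("")
--             continue
--         last_blank = False
--         cleaned.append(s)
--     return cleaned
-- ===== SOURCE B (Python) =====
-- def _keep(raw):
--     """Return None for hash-only separator lines, else (rstripped line, is_blank)."""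
--     s = str(raw).rstrip("\r\n")
--     t = s.strip()
--     if t and len(t) >= 3 and set(t) == {"#"}:
--         return None
--     return (s, not t)
--
--
-- def _clean_tail_lines(raw_lines: list[str]) -> list[str]:
--     # phase 1: drop hash-only separators, tag each kept line as blank/non-blank
--     kept = [p for raw in raw_lines if (p := _keep(raw)) is not None]
--     # phase 2: walk the kept lines run by run; a run of blanks becomes one ""
--     out: list[str] = []
--     i = 0
--     n = len(kept)
--     while i < n:
--         s, blank = kept[i]
--         i += 1
--         if blank:
--             out.append("")
--             while i < n and kept[i][1]:
--                 i += 1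
--         else:
--             out.append(s)
--     return out
-- ===== Notes on version B (the rewrite author's own statement) =====
-- stated objective: simpler
-- what changed: Replaces A's last_blank accumulator flag with a two-phase decomposition: first filter out hash-only separator lines into tagged (line, is_blank) pairs, then collapse each run of blanks to a single empty string by explicit run-skipping.
import Mathlib
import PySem

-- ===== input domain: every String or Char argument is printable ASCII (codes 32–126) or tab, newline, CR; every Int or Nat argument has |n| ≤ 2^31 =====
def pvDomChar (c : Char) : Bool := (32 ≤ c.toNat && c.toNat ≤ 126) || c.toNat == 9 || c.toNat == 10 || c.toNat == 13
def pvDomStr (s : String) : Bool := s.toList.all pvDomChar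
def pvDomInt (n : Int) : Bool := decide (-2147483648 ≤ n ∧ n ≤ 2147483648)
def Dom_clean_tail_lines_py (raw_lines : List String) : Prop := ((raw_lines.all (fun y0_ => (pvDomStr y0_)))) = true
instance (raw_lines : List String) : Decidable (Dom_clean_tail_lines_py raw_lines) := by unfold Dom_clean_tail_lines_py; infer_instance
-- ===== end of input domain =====

-- B replaces A's last_blank accumulator flag with a two-phase filter-then-collapse
-- decomposition (drop hash-only separators, then emit blank runs as a single "");
-- objective: simpler. Same return value on every input (A is total).

-- hand port of Python's s.rstrip("\r\n") (no PySem primitive for rstrip with a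
-- char set): drop trailing '\r'/'\n' characters; exact on all strings.
def pvRstripCRLF (s : String) : String :=
  String.ofList ((s.toList.reverse.dropWhile (fun c => c == '\r' || c == '\n')).reverse)

-- ===== PORT A =====
-- loop body of A: state = (cleaned, last_blank)
def pvStepA (st : List String × Bool) (raw : String) : List String × Bool :=
  let s := pvRstripCRLF raw
  let t := PySem.Str.strip s
  if t ≠ "" ∧ 3 ≤ PySem.Str.len t ∧ PySem.Set.equal (PySem.Set.ofList t.toList) (PySem.Set.ofList ['#']) = true then
    st                                   -- hash-only separator: continue
  else if t = "" then
    if st.2 then st else (st.1 ++ [""], true)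
  else
    (st.1 ++ [s], false)

def clean_tail_lines_py (raw_lines : List String) : List String :=
  (raw_lines.foldl pvStepA ([], false)).1

-- ===== PORT B =====
-- phase 1 helper (Source B's _keep): none for hash-only separators, else (s, is_blank)
def pvKeep (raw : String) : Option (String × Bool) :=
  let s := pvRstripCRLF raw
  let t := PySem.Str.strip s
  if t ≠ "" ∧ 3 ≤ PySem.Str.len t ∧ PySem.Set.equal (PySem.Set.ofList t.toList) (PySem.Set.ofList ['#']) = true then
    none
  else
    some (s, t == "")

-- phase 2 (Source B's while loop): consume the kept lines run by run; after emitting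
-- one "" for a blank, skip the rest of the blank run (the inner while = dropWhile)
def pvRender : List (String × Bool) → List String
  | [] => []
  | p :: rest =>
    if p.2 then "" :: pvRender (rest.dropWhile (fun q => q.2))
    else p.1 :: pvRender rest
termination_by l => l.length
decreasing_by
  · exact Nat.lt_succ_of_le (List.length_dropWhile_le _ _)
  · simp

def clean_tail_lines_py_alt (raw_lines : List String) : List String :=
  pvRender (raw_lines.filterMap pvKeep)

-- ===== PRECONDITION & SPEC =====
def Spec_clean_tail_lines_py (raw_lines : List String) (out : List String) : Prop := out = clean_tail_lines_py_alt raw_lines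
instance (raw_lines : List String) (out : List String) : Decidable (Spec_clean_tail_lines_py raw_lines out) := by unfold Spec_clean_tail_lines_py; infer_instance

-- ===== CLAIM (what is proved, stated in full; the proofs are below) =====
def Claim_equal_clean_tail_lines_py : Prop := ∀ (raw_lines : List String), Dom_clean_tail_lines_py raw_lines → Spec_clean_tail_lines_py raw_lines (clean_tail_lines_py raw_lines)

-- ===== LEMMAS AND PROOFS =====

-- B's phase-2 step, phrased as A's loop body acting on an already-kept pair
def pvStepB (st : List String × Bool) (p : String × Bool) : List String × Bool :=
  if p.2 then (if st.2 then st else (st.1 ++ [""], true)) else (st.1 ++ [p.1], false)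

theorem pvStepA_eq_keep (st : List String × Bool) (raw : String) :
    pvStepA st raw = (match pvKeep raw with | none => st | some p => pvStepB st p) := by
  simp only [pvStepA, pvKeep]
  generalize pvRstripCRLF raw = s
  generalize PySem.Str.strip s = t
  by_cases h1 : t ≠ "" ∧ 3 ≤ PySem.Str.len t ∧ PySem.Set.equal (PySem.Set.ofList t.toList) (PySem.Set.ofList ['#']) = true
  · simp only [if_pos h1]
  · simp only [if_neg h1]
    by_cases h2 : t = ""
    · simp [h2, pvStepB]
    · simp [h2, pvStepB]

theorem foldl_stepA_eq (raws : List String) :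
    ∀ st, List.foldl pvStepA st raws = List.foldl pvStepB st (raws.filterMap pvKeep) := by
  induction raws with
  | nil => intro st; rfl
  | cons raw rest ih =>
    intro st
    simp only [List.foldl_cons, List.filterMap_cons, pvStepA_eq_keep]
    cases h : pvKeep raw with
    | none => simpa using ih st
    | some p => simpa using ih (pvStepB st p)

theorem foldl_stepB_render (l : List (String × Bool)) :
    ∀ acc lb, (List.foldl pvStepB (acc, lb) l).1 =
      acc ++ (if lb then pvRender (l.dropWhile (fun q => q.2)) else pvRender l) := by
  induction l with
  | nil => intro acc lb; cases lb <;> simp [pvRender]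
  | cons p rest ih =>
    intro acc lb
    cases hp : p.2 <;> cases lb <;>
      simp [pvStepB, hp, pvRender, ih]

-- ===== VERDICT (by name: the statement is the Claim_ definition above) =====
theorem clean_tail_lines_py_spec : Claim_equal_clean_tail_lines_py := by
  intro raw_lines _
  show clean_tail_lines_py raw_lines = clean_tail_lines_py_alt raw_lines
  unfold clean_tail_lines_py clean_tail_lines_py_alt
  rw [foldl_stepA_eq]
  simpa using foldl_stepB_render (raw_lines.filterMap pvKeep) [] false
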